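-- pv_equiv track=rewrite | github.com/peachyplayzrb/thesis | 07_implementation/src/alignment/runtime_scope.py | filter_playlist_item_rows
-- ===== SOURCE A (Python) =====
-- def filter_playlist_item_rows(
--     rows: list[dict[str, str]],
--     playlists_limit: int | None,
--     items_per_playlist_limit: int | None,
-- ) -> list[dict[str, str]]:
--     selected: list[dict[str, str]] = []
--     playlist_order: list[str] = []
--     playlist_seen: set[str] = set()
--     counts_by_playlist: dict[str, int] = {}
--
--     for idx, row in enumerate(rows, start=1):
--         playlist_id = (row.get("playlist_id") or "").strip()
--         if not playlist_id:
--             playlist_id = f"__missing_playlist__{idx}"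
--
--         if playlist_id not in playlist_seen:
--             if playlists_limit is not None and len(playlist_order) >= playlists_limit:
--                 continue
--             playlist_seen.add(playlist_id)
--             playlist_order.append(playlist_id)
--             counts_by_playlist[playlist_id] = 0
--
--         counts_by_playlist[playlist_id] += 1
--         if items_per_playlist_limit is not None and counts_by_playlist[playlist_id] > items_per_playlist_limit:
--             continue
--
--         selected.append(row)
--
--     return selected
-- ===== SOURCE B (Python) =====
-- def filter_playlist_item_rows(
--     rows: list[dict[str, str]],
--     playlists_limit: int | None,
--     items_per_playlist_limit: int | None,
-- ) -> list[dict[str, str]]: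
--     def pid(idx, row):
--         p = (row.get("playlist_id") or "").strip()
--         return p if p else f"__missing_playlist__{idx}"
--
--     # pass 1: distinct playlist ids in first-appearance order
--     order: list[str] = []
--     for idx, row in enumerate(rows, start=1):
--         p = pid(idx, row)
--         if p not in order:
--             order.append(p)
--     allowed = set(order if playlists_limit is None else order[: max(playlists_limit, 0)])
--
--     # pass 2: keep rows of allowed playlists, capped per playlist
--     counts: dict[str, int] = {}
--     out: list[dict[str, str]] = []
--     for idx, row in enumerate(rows, start=1):
--         p = pid(idx, row)
--         if p in allowed:
--             counts[p] = counts.get(p, 0) + 1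
--             if items_per_playlist_limit is None or counts[p] <= items_per_playlist_limit:
--                 out.append(row)
--     return out
-- ===== Notes on version B (the rewrite author's own statement) =====
-- stated objective: alternative
-- what changed: Replaces A's single interleaved loop (seen-set, order list and counts maintained together with continue-based control flow) by two separate passes: a first pass builds the distinct-playlist index and derives the allowed set by truncation, and a second pass filters rows against that fixed set with a per-playlist counter.
import Mathlib
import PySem

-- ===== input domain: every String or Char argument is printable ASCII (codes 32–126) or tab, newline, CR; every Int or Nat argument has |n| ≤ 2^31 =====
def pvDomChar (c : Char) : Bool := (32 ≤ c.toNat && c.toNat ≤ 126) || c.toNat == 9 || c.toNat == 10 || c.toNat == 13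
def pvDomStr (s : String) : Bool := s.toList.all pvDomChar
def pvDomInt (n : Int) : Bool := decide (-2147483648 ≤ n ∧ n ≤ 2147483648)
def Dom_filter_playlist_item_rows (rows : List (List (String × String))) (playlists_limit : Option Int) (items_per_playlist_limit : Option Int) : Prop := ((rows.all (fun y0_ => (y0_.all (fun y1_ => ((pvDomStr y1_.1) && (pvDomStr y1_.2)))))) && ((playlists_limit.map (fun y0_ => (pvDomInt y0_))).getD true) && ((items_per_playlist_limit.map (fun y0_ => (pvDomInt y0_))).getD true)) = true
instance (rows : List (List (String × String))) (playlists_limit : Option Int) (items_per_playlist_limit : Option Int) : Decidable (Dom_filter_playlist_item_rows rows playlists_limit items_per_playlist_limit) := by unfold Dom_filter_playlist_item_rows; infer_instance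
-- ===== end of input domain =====

-- B separates the work into two passes — first build the distinct-playlist index and the allowed set,
-- then filter rows with per-playlist caps — replacing A's single interleaved loop; objective: alternative decomposition.


-- ===== PORT A =====
-- Literal transliteration of A: one fold over enumerate(rows, 1) carrying
-- (selected, playlist_order, playlist_seen, counts_by_playlist); the code after the
-- seen-admission block is the shared fallthrough `rest` (Python's straight-line continuation).
def filter_playlist_item_rows (rows : List (List (String × String))) (playlists_limit : Option Int) (items_per_playlist_limit : Option Int) : List (List (String × String)) :=
  ((PySem.List.enumerate rows 1).foldl
    (fun (st : List (List (String × String)) × List String × PySem.Set String × PySem.Dict String Int) ir =>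
      match st with
      | (selected, order, seen, counts) =>
        let s := PySem.Str.strip ((PySem.Dict.mk ir.2).getD "playlist_id" "")
        let p := if s = "" then "__missing_playlist__" ++ PySem.Int.toStr ir.1 else s
        -- code after the `if playlist_id not in playlist_seen` block
        let rest := fun (order : List String) (seen : PySem.Set String) (counts : PySem.Dict String Int) =>
          -- counts_by_playlist[playlist_id] += 1 : get-then-set (the key is always present here)
          let counts := counts.insert p (counts.getD p 0 + 1)
          if (match items_per_playlist_limit with
              | some m => decide (m < counts.getD p 0)
              | none => false) = true then
            (selected, order, seen, counts)        -- continue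
          else
            (selected ++ [ir.2], order, seen, counts)
        if PySem.Set.contains seen p = false then
          if (match playlists_limit with
              | some m => decide (m ≤ (order.length : Int))
              | none => false) = true then
            (selected, order, seen, counts)        -- continue
          else
            rest (order ++ [p]) (PySem.Set.add seen p) (counts.insert p 0)
        else
          rest order seen counts)
    ([], [], PySem.Set.empty, PySem.Dict.empty)).1

-- ===== PORT B =====
-- B's local helper pid(idx, row)
def pvPid (idx : Int) (row : List (String × String)) : String :=
  let p := PySem.Str.strip ((PySem.Dict.mk row).getD "playlist_id" "")
  if p = "" then "__missing_playlist__" ++ PySem.Int.toStr idx else p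

def filter_playlist_item_rows_alt (rows : List (List (String × String))) (playlists_limit : Option Int) (items_per_playlist_limit : Option Int) : List (List (String × String)) :=
  -- pass 1: distinct playlist ids in first-appearance order
  let order := (PySem.List.enumerate rows 1).foldl
    (fun (order : List String) ir =>
      if pvPid ir.1 ir.2 ∈ order then order else order ++ [pvPid ir.1 ir.2]) []
  let allowed := PySem.Set.ofList (match playlists_limit with
    | none => order
    | some m => PySem.List.slice order none (some (max m 0)))   -- order[: max(m, 0)]
  -- pass 2: keep rows of allowed playlists, capped per playlist
  ((PySem.List.enumerate rows 1).foldl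
    (fun (st : PySem.Dict String Int × List (List (String × String))) ir =>
      let p := pvPid ir.1 ir.2
      if PySem.Set.contains allowed p = true then
        let counts := st.1.insert p (st.1.getD p 0 + 1)
        if (match items_per_playlist_limit with
            | none => true
            | some m => decide (counts.getD p 0 ≤ m)) = true then
          (counts, st.2 ++ [ir.2])
        else (counts, st.2)
      else st)
    (PySem.Dict.empty, [])).2

-- ===== PRECONDITION & SPEC =====
def Spec_filter_playlist_item_rows (rows : List (List (String × String))) (playlists_limit : Option Int) (items_per_playlist_limit : Option Int) (out : List (List (String × String))) : Prop := out = filter_playlist_item_rows_alt rows playlists_limit items_per_playlist_limit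
instance (rows : List (List (String × String))) (playlists_limit : Option Int) (items_per_playlist_limit : Option Int) (out : List (List (String × String))) : Decidable (Spec_filter_playlist_item_rows rows playlists_limit items_per_playlist_limit out) := by unfold Spec_filter_playlist_item_rows; infer_instance

-- ===== CLAIM (what is proved, stated in full; the proofs are below) =====
def Claim_equal_filter_playlist_item_rows : Prop := ∀ (rows : List (List (String × String))) (playlists_limit : Option Int) (items_per_playlist_limit : Option Int), Dom_filter_playlist_item_rows rows playlists_limit items_per_playlist_limit → Spec_filter_playlist_item_rows rows playlists_limit items_per_playlist_limit (filter_playlist_item_rows rows playlists_limit items_per_playlist_limit)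

-- ===== LEMMAS AND PROOFS =====

-- the limit-truncation both programs effect on the distinct-id list
def pvTake (pl : Option Int) (l : List String) : List String :=
  match pl with | none => l | some m => l.take m.toNat

-- dedup with accumulator: the distinct ids (by pvPid) of the tagged rows, appended to d
def pvDedup (d : List String) : List (Int × List (String × String)) → List String
  | [] => d
  | ir :: l => if pvPid ir.1 ir.2 ∈ d then pvDedup d l else pvDedup (d ++ [pvPid ir.1 ir.2]) l

-- common reference run: filter by a fixed allowed list, cap by a running count function
def pvSpecRun (al : List String) (il : Option Int) (cnt : String → Int) : List (Int × List (String × String)) → List (List (String × String))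
  | [] => []
  | ir :: l =>
    let p := pvPid ir.1 ir.2
    if p ∈ al then
      (if (match il with | none => true | some m => decide (cnt p + 1 ≤ m)) = true then [ir.2] else []) ++
        pvSpecRun al il (fun q => if q = p then cnt p + 1 else cnt q) l
    else pvSpecRun al il cnt l

theorem pvDedup_prefix (l : List (Int × List (String × String))) (d : List String) : d <+: pvDedup d l := by
  induction l generalizing d with
  | nil => exact List.prefix_refl d
  | cons ir l ih =>
    simp only [pvDedup]
    split
    · exact ih d
    · exact List.IsPrefix.trans ⟨[pvPid ir.1 ir.2], rfl⟩ (ih _)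

theorem pvTake_mono {x : String} {d e : List String} (pl : Option Int) (h : d <+: e) (hx : x ∈ pvTake pl d) : x ∈ pvTake pl e := by
  obtain ⟨t, rfl⟩ := h
  cases pl with
  | none => simp only [pvTake] at *; exact List.mem_append_left _ hx
  | some m =>
    simp only [pvTake, List.take_append] at *
    exact List.mem_append_left _ hx

theorem pvTake_stable {d e : List String} (m : Int) (h : d <+: e) (hlen : m.toNat ≤ d.length) : pvTake (some m) e = pvTake (some m) d := by
  obtain ⟨t, rfl⟩ := h
  simp only [pvTake, List.take_append]
  have : m.toNat - d.length = 0 := by omega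
  simp [this]

-- the main invariant lemma for A's fold
theorem pvPid_fold (i : Int) (r : List (String × String)) :
    (if PySem.Str.strip ((PySem.Dict.mk r).getD "playlist_id" "") = "" then "__missing_playlist__" ++ PySem.Int.toStr i
     else PySem.Str.strip ((PySem.Dict.mk r).getD "playlist_id" "")) = pvPid i r := rfl

theorem pvA_run (pl il : Option Int) (l : List (Int × List (String × String)))
    (selected : List (List (String × String))) (order d : List String)
    (seen : PySem.Set String) (counts : PySem.Dict String Int) (cnt : String → Int)
    (hseen : ∀ q, PySem.Set.contains seen q = true ↔ q ∈ order)
    (horder : order = pvTake pl d)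
    (hcnt : ∀ q, counts.getD q 0 = cnt q)
    (hzero : ∀ q, q ∉ order → cnt q = 0) :
    (l.foldl
      (fun (st : List (List (String × String)) × List String × PySem.Set String × PySem.Dict String Int) ir =>
        match st with
        | (selected, order, seen, counts) =>
          let s := PySem.Str.strip ((PySem.Dict.mk ir.2).getD "playlist_id" "")
          let p := if s = "" then "__missing_playlist__" ++ PySem.Int.toStr ir.1 else s
          let rest := fun (order : List String) (seen : PySem.Set String) (counts : PySem.Dict String Int) =>
            let counts := counts.insert p (counts.getD p 0 + 1)
            if (match il with
                | some m => decide (m < counts.getD p 0)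
                | none => false) = true then
              (selected, order, seen, counts)
            else
              (selected ++ [ir.2], order, seen, counts)
          if PySem.Set.contains seen p = false then
            if (match pl with
                | some m => decide (m ≤ (order.length : Int))
                | none => false) = true then
              (selected, order, seen, counts)
            else
              rest (order ++ [p]) (PySem.Set.add seen p) (counts.insert p 0)
          else
            rest order seen counts)
      (selected, order, seen, counts)).1
    = selected ++ pvSpecRun (pvTake pl (pvDedup d l)) il cnt l := by
  induction l generalizing selected order d seen counts cnt with
  | nil => simp [pvSpecRun]
  | cons ir l ih =>
    have hctn : ∀ (s : PySem.Set String) (q : String), (PySem.Set.contains s q = true) ↔ q ∈ s := by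
      intro s q; simp [PySem.Set.contains]
    by_cases hs : PySem.Set.contains seen (pvPid ir.1 ir.2) = true
    · -- playlist already admitted
      have hsm : pvPid ir.1 ir.2 ∈ seen := (hctn _ _).mp hs
      have hpo : pvPid ir.1 ir.2 ∈ order := (hseen _).mp hs
      have hpd : pvPid ir.1 ir.2 ∈ d := by
        rw [horder] at hpo
        cases pl with
        | none => exact hpo
        | some m => exact List.mem_of_mem_take hpo
      have hal : pvPid ir.1 ir.2 ∈ pvTake pl (pvDedup d l) :=
        pvTake_mono pl (pvDedup_prefix l d) (horder ▸ hpo)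
      have hgd : (counts.insert (pvPid ir.1 ir.2) (counts.getD (pvPid ir.1 ir.2) 0 + 1)).getD (pvPid ir.1 ir.2) 0 = cnt (pvPid ir.1 ir.2) + 1 := by
        rw [PySem.Dict.getD_insert]; simp [hcnt]
      have hcnt' : ∀ q, (counts.insert (pvPid ir.1 ir.2) (counts.getD (pvPid ir.1 ir.2) 0 + 1)).getD q 0
          = if q = pvPid ir.1 ir.2 then cnt (pvPid ir.1 ir.2) + 1 else cnt q := by
        intro q; rw [PySem.Dict.getD_insert]; split <;> simp [hcnt]
      have hzero' : ∀ q, q ∉ order → (if q = pvPid ir.1 ir.2 then cnt (pvPid ir.1 ir.2) + 1 else cnt q) = 0 := by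
        intro q hq; rw [if_neg (by rintro rfl; exact hq hpo)]; exact hzero q hq
      cases il with
      | none =>
        simpa [pvPid_fold, pvSpecRun, pvDedup, hsm, hpd, hal, hgd] using
          ih (selected ++ [ir.2]) order d seen _ _ hseen horder hcnt' hzero'
      | some k =>
        by_cases hk : cnt (pvPid ir.1 ir.2) + 1 ≤ k
        · have hA : ¬ k ≤ cnt (pvPid ir.1 ir.2) := by omega
          simpa [pvPid_fold, pvSpecRun, pvDedup, hsm, hpd, hal, hgd, hcnt, hk, hA] using
            ih (selected ++ [ir.2]) order d seen _ _ hseen horder hcnt' hzero'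
        · have hA : k ≤ cnt (pvPid ir.1 ir.2) := by omega
          simpa [pvPid_fold, pvSpecRun, pvDedup, hsm, hpd, hal, hgd, hcnt, hk, hA] using
            ih selected order d seen _ _ hseen horder hcnt' hzero'
    · -- playlist not seen yet
      have hsm : pvPid ir.1 ir.2 ∉ seen := fun h => hs ((hctn _ _).mpr h)
      have hpo : pvPid ir.1 ir.2 ∉ order := fun h => hs ((hseen _).mpr h)
      have hms : ∀ q, q ∈ seen ↔ q ∈ order := fun q =>
        ⟨fun h => (hseen q).mp ((hctn _ _).mpr h), fun h => (hctn _ _).mp ((hseen q).mpr h)⟩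
      have hseen' : ∀ q, PySem.Set.contains (PySem.Set.add seen (pvPid ir.1 ir.2)) q = true ↔ q ∈ order ++ [pvPid ir.1 ir.2] := by
        intro q; rw [hctn, PySem.Set.mem_add]; simp [hms q]
      have hc0 : cnt (pvPid ir.1 ir.2) = 0 := hzero _ hpo
      have hgd2 : ∀ q, (((counts.insert (pvPid ir.1 ir.2) 0).insert (pvPid ir.1 ir.2) ((counts.insert (pvPid ir.1 ir.2) 0).getD (pvPid ir.1 ir.2) 0 + 1))).getD q 0
          = if q = pvPid ir.1 ir.2 then cnt (pvPid ir.1 ir.2) + 1 else cnt q := by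
        intro q
        rw [PySem.Dict.getD_insert, PySem.Dict.getD_insert, PySem.Dict.getD_insert]
        split <;> simp [hcnt, hc0]
      have hzero2 : ∀ q, q ∉ order ++ [pvPid ir.1 ir.2] → (if q = pvPid ir.1 ir.2 then cnt (pvPid ir.1 ir.2) + 1 else cnt q) = 0 := by
        intro q hq
        simp only [List.mem_append, List.mem_singleton, not_or] at hq
        rw [if_neg hq.2]; exact hzero q hq.1
      cases pl with
      | none =>
        -- no playlist limit: always admit the new playlist
        have hfull : order = d := horder
        have hpd : pvPid ir.1 ir.2 ∉ d := hfull ▸ hpo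
        have horder' : order ++ [pvPid ir.1 ir.2] = pvTake none (d ++ [pvPid ir.1 ir.2]) := by
          simp [pvTake, hfull]
        have hal : pvPid ir.1 ir.2 ∈ pvTake none (pvDedup (d ++ [pvPid ir.1 ir.2]) l) :=
          pvTake_mono none (pvDedup_prefix _ _) (by simp [pvTake])
        cases il with
        | none =>
          simpa [pvPid_fold, pvSpecRun, pvDedup, hsm, hpd, hal, hgd2, hc0] using
            ih (selected ++ [ir.2]) (order ++ [pvPid ir.1 ir.2]) (d ++ [pvPid ir.1 ir.2]) _ _ _ hseen' horder' hgd2 hzero2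
        | some k =>
          by_cases hk : cnt (pvPid ir.1 ir.2) + 1 ≤ k
          · have hA : ¬ k < 1 := by omega
            have hA2 : ¬ k ≤ 0 := by omega
            have hA3 : 1 ≤ k := by omega
            simpa [pvPid_fold, pvSpecRun, pvDedup, hsm, hpd, hal, hgd2, hc0, hk, hA, hA2, hA3] using
              ih (selected ++ [ir.2]) (order ++ [pvPid ir.1 ir.2]) (d ++ [pvPid ir.1 ir.2]) _ _ _ hseen' horder' hgd2 hzero2
          · have hA : k < 1 := by omega
            have hA2 : k ≤ 0 := by omega
            have hA3 : ¬ 1 ≤ k := by omega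
            simpa [pvPid_fold, pvSpecRun, pvDedup, hsm, hpd, hal, hgd2, hc0, hk, hA, hA2, hA3] using
              ih selected (order ++ [pvPid ir.1 ir.2]) (d ++ [pvPid ir.1 ir.2]) _ _ _ hseen' horder' hgd2 hzero2
      | some m =>
        have hlen : order.length = min m.toNat d.length := by rw [horder]; simp [pvTake]
        by_cases hg : m ≤ (order.length : Int)
        · -- limit reached: skip
          have hdlen : m.toNat ≤ d.length := by omega
          by_cases hpd : pvPid ir.1 ir.2 ∈ d
          · have hal : pvPid ir.1 ir.2 ∉ pvTake (some m) (pvDedup d l) := by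
              rw [pvTake_stable m (pvDedup_prefix l d) hdlen, ← horder]; exact hpo
            simpa [pvPid_fold, pvSpecRun, pvDedup, hsm, hpd, hal, hg] using
              ih selected order d seen counts cnt hseen horder hcnt hzero
          · have horder' : order = pvTake (some m) (d ++ [pvPid ir.1 ir.2]) := by
              rw [pvTake_stable m ⟨[pvPid ir.1 ir.2], rfl⟩ hdlen]; exact horder
            have hdlen' : m.toNat ≤ (d ++ [pvPid ir.1 ir.2]).length := by simp; omega
            have hal : pvPid ir.1 ir.2 ∉ pvTake (some m) (pvDedup (d ++ [pvPid ir.1 ir.2]) l) := by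
              rw [pvTake_stable m (pvDedup_prefix _ _) hdlen', ← horder']; exact hpo
            simpa [pvPid_fold, pvSpecRun, pvDedup, hsm, hpd, hal, hg] using
              ih selected order (d ++ [pvPid ir.1 ir.2]) seen counts cnt hseen horder' hcnt hzero
        · -- still under the limit: admit the new playlist
          have hdle : d.length ≤ m.toNat := by omega
          have hfull : order = d := by rw [horder]; simp [pvTake, List.take_of_length_le hdle]
          have hpd : pvPid ir.1 ir.2 ∉ d := hfull ▸ hpo
          have hlt : d.length < m.toNat := by omega
          have horder' : order ++ [pvPid ir.1 ir.2] = pvTake (some m) (d ++ [pvPid ir.1 ir.2]) := by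
            rw [hfull]
            simp only [pvTake, List.take_append]
            rw [List.take_of_length_le hdle, List.take_of_length_le (by simp; omega)]
          have hal : pvPid ir.1 ir.2 ∈ pvTake (some m) (pvDedup (d ++ [pvPid ir.1 ir.2]) l) :=
            pvTake_mono (some m) (pvDedup_prefix _ _)
              (by rw [← horder']; exact List.mem_append_right _ (List.mem_singleton_self _))
          cases il with
          | none =>
            simpa [pvPid_fold, pvSpecRun, pvDedup, hsm, hpd, hal, hgd2, hc0, hg] using
              ih (selected ++ [ir.2]) (order ++ [pvPid ir.1 ir.2]) (d ++ [pvPid ir.1 ir.2]) _ _ _ hseen' horder' hgd2 hzero2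
          | some k =>
            by_cases hk : cnt (pvPid ir.1 ir.2) + 1 ≤ k
            · have hA : ¬ k < 1 := by omega
              have hA2 : ¬ k ≤ 0 := by omega
              have hA3 : 1 ≤ k := by omega
              simpa [pvPid_fold, pvSpecRun, pvDedup, hsm, hpd, hal, hgd2, hc0, hg, hk, hA, hA2, hA3] using
                ih (selected ++ [ir.2]) (order ++ [pvPid ir.1 ir.2]) (d ++ [pvPid ir.1 ir.2]) _ _ _ hseen' horder' hgd2 hzero2
            · have hA : k < 1 := by omega
              have hA2 : k ≤ 0 := by omega
              have hA3 : ¬ 1 ≤ k := by omega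
              simpa [pvPid_fold, pvSpecRun, pvDedup, hsm, hpd, hal, hgd2, hc0, hg, hk, hA, hA2, hA3] using
                ih selected (order ++ [pvPid ir.1 ir.2]) (d ++ [pvPid ir.1 ir.2]) _ _ _ hseen' horder' hgd2 hzero2

-- B's first pass computes pvDedup
theorem pvB_pass1 (l : List (Int × List (String × String))) (d : List String) :
    l.foldl (fun (order : List String) ir =>
      if pvPid ir.1 ir.2 ∈ order then order else order ++ [pvPid ir.1 ir.2]) d = pvDedup d l := by
  induction l generalizing d with
  | nil => rfl
  | cons ir l ih => simp only [List.foldl, pvDedup]; split <;> simp_all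

-- B's second pass computes pvSpecRun
theorem pvB_pass2 (al : List String) (il : Option Int) (l : List (Int × List (String × String)))
    (counts : PySem.Dict String Int) (acc : List (List (String × String))) (cnt : String → Int)
    (hcnt : ∀ q, counts.getD q 0 = cnt q) :
    (l.foldl
      (fun (st : PySem.Dict String Int × List (List (String × String))) ir =>
        let p := pvPid ir.1 ir.2
        if PySem.Set.contains (PySem.Set.ofList al) p = true then
          let counts := st.1.insert p (st.1.getD p 0 + 1)
          if (match il with
              | none => true
              | some m => decide (counts.getD p 0 ≤ m)) = true then
            (counts, st.2 ++ [ir.2])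
          else (counts, st.2)
        else st)
      (counts, acc)).2
    = acc ++ pvSpecRun al il cnt l := by
  induction l generalizing counts acc cnt with
  | nil => simp [pvSpecRun]
  | cons ir l ih =>
    simp only [List.foldl, pvSpecRun]
    by_cases hp : pvPid ir.1 ir.2 ∈ al
    · have hc : PySem.Set.contains (PySem.Set.ofList al) (pvPid ir.1 ir.2) = true := by
        simp [PySem.Set.contains, PySem.Set.mem_ofList, hp]
      have hgd : (counts.insert (pvPid ir.1 ir.2) (counts.getD (pvPid ir.1 ir.2) 0 + 1)).getD (pvPid ir.1 ir.2) 0 = cnt (pvPid ir.1 ir.2) + 1 := by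
        rw [PySem.Dict.getD_insert]; simp [hcnt]
      have hcnt' : ∀ q, (counts.insert (pvPid ir.1 ir.2) (counts.getD (pvPid ir.1 ir.2) 0 + 1)).getD q 0
          = if q = pvPid ir.1 ir.2 then cnt (pvPid ir.1 ir.2) + 1 else cnt q := by
        intro q; rw [PySem.Dict.getD_insert]; split <;> simp [hcnt]
      cases il with
      | none =>
        simpa [hc, hp, hgd] using
          ih (counts.insert (pvPid ir.1 ir.2) (counts.getD (pvPid ir.1 ir.2) 0 + 1)) (acc ++ [ir.2]) _ hcnt'
      | some m =>
        by_cases hk : cnt (pvPid ir.1 ir.2) + 1 ≤ m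
        · simpa [hc, hp, hgd, hk] using
            ih (counts.insert (pvPid ir.1 ir.2) (counts.getD (pvPid ir.1 ir.2) 0 + 1)) (acc ++ [ir.2]) _ hcnt'
        · simpa [hc, hp, hgd, hk] using
            ih (counts.insert (pvPid ir.1 ir.2) (counts.getD (pvPid ir.1 ir.2) 0 + 1)) acc _ hcnt'
    · have hc : ¬ PySem.Set.contains (PySem.Set.ofList al) (pvPid ir.1 ir.2) = true := by
        simp [PySem.Set.contains, PySem.Set.mem_ofList, hp]
      simp only [if_neg hc, if_neg hp, ih _ _ _ hcnt]

-- ===== VERDICT (by name: the statement is the Claim_ definition above) =====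
theorem filter_playlist_item_rows_spec : Claim_equal_filter_playlist_item_rows := by
  intro rows pl il _
  unfold Spec_filter_playlist_item_rows
  simp only [filter_playlist_item_rows, filter_playlist_item_rows_alt]
  rw [pvB_pass1]
  have hal : PySem.Set.ofList (match pl with
      | none => pvDedup [] (PySem.List.enumerate rows 1)
      | some m => PySem.List.slice (pvDedup [] (PySem.List.enumerate rows 1)) none (some (max m 0)))
      = PySem.Set.ofList (pvTake pl (pvDedup [] (PySem.List.enumerate rows 1))) := by
    cases pl with
    | none => rfl
    | some m =>
      show PySem.Set.ofList (PySem.List.slice (pvDedup [] (PySem.List.enumerate rows 1)) none (some (max m 0)))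
          = PySem.Set.ofList (pvTake (some m) (pvDedup [] (PySem.List.enumerate rows 1)))
      rw [PySem.List.slice_to _ (le_max_right m 0)]
      have : (max m 0).toNat = m.toNat := by
        rcases le_total m 0 with h | h
        · rw [max_eq_right h]; omega
        · rw [max_eq_left h]
      rw [this]; rfl
  rw [hal, pvB_pass2 _ il _ PySem.Dict.empty [] (fun _ => 0) (fun q => rfl)]
  have hA := pvA_run pl il (PySem.List.enumerate rows 1) [] [] [] PySem.Set.empty PySem.Dict.empty (fun _ => 0)
    (by intro q; simp [PySem.Set.contains, PySem.Set.empty])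
    (by cases pl <;> simp [pvTake])
    (fun q => rfl) (fun q _ => rfl)
  rw [hA]
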